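-- pv_equiv track=rewrite | github.com/sun7shines/Cloudfs | cloud/swift/common/AccountMeta.py | filter_marker
-- ===== SOURCE A (Python) =====
-- def filter_marker(objects, marker):
--     """
--     TODO: We can traverse in reverse order to optimize.
--     Accept sorted list.
--     """
--     filtered_objs=[]
--     found = 0
--     if objects[-1] < marker:
--         return filtered_objs
--     for object_name in objects:
--         if object_name > marker:
--             filtered_objs.append(object_name)
--
--     return filtered_objs
-- ===== SOURCE B (Python) =====
-- def filter_marker(objects, marker):
--     if objects[-1] < marker:
--         return []
--     def grab(lo, hi):
--         # elements of objects[lo:hi] greater than marker, by divide and conquer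
--         if hi - lo <= 1:
--             return [objects[lo]] if lo < hi and objects[lo] > marker else []
--         mid = (lo + hi) // 2
--         return grab(lo, mid) + grab(mid, hi)
--     return grab(0, len(objects))
-- ===== Notes on version B (the rewrite author's own statement) =====
-- stated objective: alternative
-- what changed: B computes the kept elements by divide-and-conquer recursion on index intervals, concatenating the two halves' results, instead of A's single linear append loop.
import Mathlib
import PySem

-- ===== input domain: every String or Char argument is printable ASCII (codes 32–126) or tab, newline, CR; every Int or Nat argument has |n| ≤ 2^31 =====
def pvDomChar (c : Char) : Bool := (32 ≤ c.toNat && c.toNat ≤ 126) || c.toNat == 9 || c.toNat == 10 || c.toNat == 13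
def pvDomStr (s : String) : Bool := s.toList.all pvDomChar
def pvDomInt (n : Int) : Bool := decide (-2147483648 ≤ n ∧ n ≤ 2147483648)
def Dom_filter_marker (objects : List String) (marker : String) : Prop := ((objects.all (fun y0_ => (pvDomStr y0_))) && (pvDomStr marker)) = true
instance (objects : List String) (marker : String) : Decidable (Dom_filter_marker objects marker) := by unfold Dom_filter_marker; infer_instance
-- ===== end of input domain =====

-- B replaces A's linear append loop by divide-and-conquer recursion on index intervals; return values proved equal on nonempty lists (A raises IndexError on []).


-- ===== PORT A =====
def filter_marker (objects : List String) (marker : String) : List String :=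
  match PySem.List.pyGet? objects (-1) with
  | none => []            -- objects[-1] raises IndexError; excluded by Pre_
  | some last =>
    if last < marker then []
    else objects.foldl (fun acc x => if marker < x then acc ++ [x] else acc) []

-- ===== PORT B =====
-- grab(lo, hi) of Source B; structural recursion on a fuel bounding hi - lo (each recursive call
-- strictly shrinks hi - lo, so fuel = objects.length at the call site is always enough and never
-- alters the result); objects[lo] is only read with lo < hi ≤ len, so getD's default is never used
def pvGrab (objects : List String) (marker : String) : Nat → Nat → Nat → List String
  | 0, _, _ => []
  | fuel + 1, lo, hi =>
    if hi - lo ≤ 1 then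
      if lo < hi ∧ marker < objects.getD lo "" then [objects.getD lo ""] else []
    else
      let mid := (lo + hi) / 2
      pvGrab objects marker fuel lo mid ++ pvGrab objects marker fuel mid hi

def filter_marker_alt (objects : List String) (marker : String) : List String :=
  match PySem.List.pyGet? objects (-1) with
  | none => []            -- objects[-1] raises IndexError; excluded by Pre_
  | some last =>
    if last < marker then []
    else pvGrab objects marker objects.length 0 objects.length

-- ===== PRECONDITION & SPEC =====
-- A evaluates objects[-1]: it raises IndexError exactly on the empty list.
def Pre_filter_marker (objects : List String) (_marker : String) : Prop := objects ≠ []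
instance (objects : List String) (marker : String) : Decidable (Pre_filter_marker objects marker) := by unfold Pre_filter_marker; infer_instance
def pvWitness_filter_marker : List String × String := (["a", "c"], "b")

def Spec_filter_marker (objects : List String) (marker : String) (out : List String) : Prop := out = filter_marker_alt objects marker
instance (objects : List String) (marker : String) (out : List String) : Decidable (Spec_filter_marker objects marker out) := by unfold Spec_filter_marker; infer_instance

-- ===== CLAIM (what is proved, stated in full; the proofs are below) =====
def Claim_equal_filter_marker : Prop := ∀ (objects : List String) (marker : String), Dom_filter_marker objects marker → Pre_filter_marker objects marker → Spec_filter_marker objects marker (filter_marker objects marker)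

-- ===== LEMMAS AND PROOFS =====

-- grab(lo, hi) returns exactly the filter of the slice objects[lo:hi]
lemma pvGrab_eq_filter (objects : List String) (marker : String) :
    ∀ (fuel lo hi : Nat), hi - lo ≤ fuel → hi ≤ objects.length →
    pvGrab objects marker fuel lo hi =
      ((objects.take hi).drop lo).filter (fun x => decide (marker < x)) := by
  intro fuel
  induction fuel with
  | zero =>
    intro lo hi hfuel hhi
    have hdrop : ((objects.take hi).drop lo) = [] := by
      apply List.drop_eq_nil_of_le
      simp [List.length_take]; omega
    simp [pvGrab, hdrop]
  | succ fuel ih =>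
    intro lo hi hfuel hhi
    by_cases hbase : hi - lo ≤ 1
    · simp only [pvGrab, if_pos hbase]
      rcases Nat.lt_or_ge lo hi with hlt | hge
      · -- hi = lo + 1 : the slice is the singleton [objects[lo]]
        have hhi1 : hi = lo + 1 := by omega
        have hlo : lo < objects.length := by omega
        have hslice : (objects.take hi).drop lo = [objects[lo]] := by
          rw [hhi1, List.drop_take, List.drop_eq_getElem_cons hlo,
            show lo + 1 - lo = 1 by omega, List.take_succ_cons, List.take_zero]
        have hg : objects.getD lo "" = objects[lo] := List.getD_eq_getElem _ _ hlo
        rw [hslice]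
        by_cases hp : marker < objects[lo]
        · rw [if_pos ⟨hlt, hg ▸ hp⟩, hg]
          have hd : (decide (marker < objects[lo])) = true := decide_eq_true hp
          simp only [List.filter_cons, hd, if_true, List.filter_nil]
        · rw [if_neg (fun hc => hp (hg ▸ hc.2))]
          have hd : (decide (marker < objects[lo])) = false := decide_eq_false hp
          simp only [List.filter_cons, hd, Bool.false_eq_true, if_false, List.filter_nil]
      · -- empty interval
        have hdrop : ((objects.take hi).drop lo) = [] := by
          apply List.drop_eq_nil_of_le
          simp [List.length_take]; omega
        rw [if_neg (by omega), hdrop, List.filter_nil]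
    · -- split at mid and use both inductive hypotheses
      simp only [pvGrab, if_neg hbase]
      set mid := (lo + hi) / 2 with hmid
      have h1 : lo < mid := by omega
      have h2 : mid < hi := by omega
      have hsplit : (objects.take hi).drop lo =
          ((objects.take mid).drop lo) ++ ((objects.take hi).drop mid) := by
        have htt : (objects.take hi).take mid = objects.take mid := by
          rw [List.take_take]; congr 1; omega
        conv_lhs => rw [← List.take_append_drop mid (objects.take hi)]
        rw [List.drop_append_of_le_length (by simp [List.length_take]; omega), htt]
      rw [hsplit, List.filter_append,
        ih lo mid (by omega) (by omega), ih mid hi (by omega) hhi]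

-- ===== VERDICT (by name: the statement is the Claim_ definition above) =====
theorem filter_marker_spec : Claim_equal_filter_marker := by
  intro objects marker _ hne
  unfold Spec_filter_marker filter_marker filter_marker_alt
  cases h : PySem.List.pyGet? objects (-1) with
  | none => rfl
  | some last =>
    simp only
    split
    · rfl
    · rw [PySem.List.foldl_append_ite_eq_filter, List.nil_append,
        pvGrab_eq_filter objects marker objects.length 0 objects.length (by omega) (le_refl _),
        List.take_length, List.drop_zero]
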